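-- pv_equiv track=rewrite | github.com/SakshiI10/Python-DSA | 5_Strings/74_The_Muskteers.py | checkTogether
-- ===== SOURCE A (Python) =====
-- def checkTogether(str):
--     if '0' not in str:
--         return 'NO'
--
--     first = str.find('0')
--     last = str.rfind('0')
--
--     for i in range(first, last + 1):
--         if str[i] != '0':
--             return 'NO'
--
--     return 'YES'
-- ===== SOURCE B (Python) =====
-- def checkTogether(str):
--     # one-pass state machine: 0 = no zero seen yet, 1 = inside the zero block,
--     # 2 = zero block finished; a zero seen in state 2 means zeros are not contiguous
--     state = 0
--     for c in str:
--         if c == '0':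
--             if state == 2:
--                 return 'NO'
--             state = 1
--         elif state == 1:
--             state = 2
--     return 'YES' if state else 'NO'
-- ===== Notes on version B (the rewrite author's own statement) =====
-- stated objective: alternative
-- what changed: Replaces find/rfind plus an index loop over the zero window by a single-pass three-state machine over the characters.
import Mathlib
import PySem

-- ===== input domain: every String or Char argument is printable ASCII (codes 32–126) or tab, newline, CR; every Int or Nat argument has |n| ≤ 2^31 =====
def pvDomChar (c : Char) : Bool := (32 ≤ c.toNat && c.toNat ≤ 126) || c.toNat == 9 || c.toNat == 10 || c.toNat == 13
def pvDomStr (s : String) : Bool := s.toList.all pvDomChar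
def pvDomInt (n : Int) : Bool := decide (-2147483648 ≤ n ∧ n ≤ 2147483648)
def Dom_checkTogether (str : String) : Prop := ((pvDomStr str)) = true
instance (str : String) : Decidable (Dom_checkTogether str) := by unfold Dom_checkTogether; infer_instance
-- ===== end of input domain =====

-- B replaces A's find/rfind plus index-loop window scan by a single-pass three-state machine; objective: alternative (same cost).


-- ===== PORT A =====
-- interior scan: `for i in range(first, last+1): if str[i] != '0': return 'NO'`
def checkTogetherScan (cs : List Char) : List Int → String
  | [] => "YES"
  | i :: rest =>
    match PySem.List.pyGet? cs i with
    | some c => if c ≠ '0' then "NO" else checkTogetherScan cs rest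
    | none => "NO"  -- IndexError; unreachable: every scanned index lies between find and rfind

def checkTogether (str : String) : String :=
  if PySem.Str.isIn "0" str = false then "NO"
  else
    let first := PySem.Str.find str "0"
    let last := PySem.Str.rfind str "0"
    checkTogetherScan str.toList (PySem.List.pyRange first (last + 1) 1)

-- ===== PORT B =====
-- state 0 = no zero seen yet, 1 = inside the zero block, 2 = zero block finished
def checkTogetherDFA (state : Int) : List Char → String
  | [] => if state ≠ 0 then "YES" else "NO"
  | c :: rest =>
    if c = '0' then
      if state = 2 then "NO" else checkTogetherDFA 1 rest
    else if state = 1 then checkTogetherDFA 2 rest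
    else checkTogetherDFA state rest

def checkTogether_alt (str : String) : String := checkTogetherDFA 0 str.toList

-- ===== PRECONDITION & SPEC =====
def Spec_checkTogether (str : String) (out : String) : Prop := out = checkTogether_alt str
instance (str : String) (out : String) : Decidable (Spec_checkTogether str out) := by unfold Spec_checkTogether; infer_instance

-- ===== CLAIM (what is proved, stated in full; the proofs are below) =====
def Claim_equal_checkTogether : Prop := ∀ (str : String), Dom_checkTogether str → Spec_checkTogether str (checkTogether str)

-- ===== LEMMAS AND PROOFS =====

-- the DFA in state 2 returns "YES" iff no further zero occurs
theorem dfa2 (l : List Char) : checkTogetherDFA 2 l = if '0' ∈ l then "NO" else "YES" := by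
  induction l with
  | nil => simp [checkTogetherDFA]
  | cons c r ih =>
    by_cases hc : c = '0' <;> simp [checkTogetherDFA, hc, ih, eq_comm]

-- the DFA in state 1 first skips the zeros, then behaves as state 2
theorem dfa1 (l : List Char) : checkTogetherDFA 1 l = checkTogetherDFA 2 (l.dropWhile (· == '0')) := by
  induction l with
  | nil => simp [checkTogetherDFA, List.dropWhile]
  | cons c r ih =>
    by_cases hc : c = '0'
    · simpa [checkTogetherDFA, hc, List.dropWhile] using ih
    · have : (c == '0') = false := by simpa using hc
      simp [checkTogetherDFA, hc, List.dropWhile, this]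

-- the DFA in state 0 skips up to the first zero and enters state 1 behind it
theorem dfa0 (l : List Char) :
    checkTogetherDFA 0 l =
      if '0' ∈ l then checkTogetherDFA 1 (l.dropWhile (· != '0')).tail else "NO" := by
  induction l with
  | nil => simp [checkTogetherDFA]
  | cons c r ih =>
    by_cases hc : c = '0'
    · simp [checkTogetherDFA, hc, List.dropWhile]
    · have hb : (c != '0') = true := by simpa using hc
      simp [checkTogetherDFA, hc, List.dropWhile, hb, ih, eq_comm]

-- A's scan returns "YES" iff every scanned position holds '0'
theorem scan_eq (cs : List Char) (is : List Int) :
    checkTogetherScan cs is =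
      if (∀ i ∈ is, PySem.List.pyGet? cs i = some '0') then "YES" else "NO" := by
  induction is with
  | nil => simp [checkTogetherScan]
  | cons i rest ih =>
    rcases hg : PySem.List.pyGet? cs i with _ | c
    · simp [checkTogetherScan, hg]
    · by_cases hc : c = '0'
      · subst hc
        simp [checkTogetherScan, hg, ih]
      · simp [checkTogetherScan, hg, hc]

-- `['0']` is a prefix of `l.drop n` exactly when position n holds '0'
theorem prefix_drop_iff (l : List Char) (n : Nat) :
    ['0'] <+: l.drop n ↔ l[n]? = some '0' := by
  constructor
  · rintro ⟨t, ht⟩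
    have : (l.drop n)[0]? = some '0' := by rw [← ht]; rfl
    simpa [List.getElem?_drop] using this
  · intro h
    have h0 : (l.drop n)[0]? = some '0' := by simpa [List.getElem?_drop] using h
    rcases hd : l.drop n with _ | ⟨c, t⟩
    · simp [hd] at h0
    · rw [hd] at h0
      simp at h0
      exact ⟨t, by simp [h0]⟩

-- singleton infix = membership
theorem singleton_infix_iff (c : Char) (l : List Char) : [c] <:+: l ↔ c ∈ l := by
  constructor
  · rintro ⟨s, t, h⟩
    subst h; simp
  · intro h
    rcases List.append_of_mem h with ⟨s, t, h⟩
    exact ⟨s, t, by simp [h]⟩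

-- spec of rfind.go: either no zero at any position ≤ j, or it returns the last such position ≤ j
theorem rgo_spec (s : List Char) (j : Nat) :
    (PySem.Chars.rfind.go s ['0'] j = -1 ∧ ∀ i ≤ j, s[i]? ≠ some '0') ∨
    (∃ m : Nat, PySem.Chars.rfind.go s ['0'] j = (m : Int) ∧ m ≤ j ∧ s[m]? = some '0' ∧
      ∀ k ≤ j, m < k → s[k]? ≠ some '0') := by
  induction j with
  | zero =>
    by_cases h : s[0]? = some '0'
    · right
      refine ⟨0, ?_, le_refl 0, h, by omega⟩
      have hp : ['0'] <+: s := by simpa using (prefix_drop_iff s 0).mpr (by simpa using h)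
      simp [PySem.Chars.rfind.go, List.isPrefixOf_iff_prefix, hp]
    · left
      constructor
      · simp [PySem.Chars.rfind.go, List.isPrefixOf_iff_prefix]
        intro hp
        exact absurd ((prefix_drop_iff s 0).mp (by simpa using hp)) h
      · intro i hi; interval_cases i; exact h
  | succ j ih =>
    by_cases h : s[j+1]? = some '0'
    · right
      refine ⟨j+1, ?_, le_refl _, h, by omega⟩
      simp [PySem.Chars.rfind.go, List.isPrefixOf_iff_prefix,
        (prefix_drop_iff s (j+1)).mpr h]
    · have hgo : PySem.Chars.rfind.go s ['0'] (j+1) = PySem.Chars.rfind.go s ['0'] j := by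
        simp [PySem.Chars.rfind.go, List.isPrefixOf_iff_prefix]
        intro hp
        exact absurd ((prefix_drop_iff s (j+1)).mp hp) h
      rcases ih with ⟨he, hall⟩ | ⟨m, he, hm, hz, hmax⟩
      · left
        refine ⟨hgo.trans he, fun i hi => ?_⟩
        rcases Nat.lt_or_ge i (j+1) with hi' | hi'
        · exact hall i (by omega)
        · have : i = j + 1 := by omega
          simpa [this] using h
      · right
        refine ⟨m, hgo.trans he, by omega, hz, fun k hk hmk => ?_⟩
        rcases Nat.lt_or_ge k (j+1) with hk' | hk'
        · exact hmax k (by omega) hmk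
        · have : k = j + 1 := by omega
          simpa [this] using h

-- head of dropWhile fails the predicate
theorem dropWhile_head_false (p : Char → Bool) (l : List Char) (c : Char)
    (h : (l.dropWhile p)[0]? = some c) : p c = false := by
  induction l with
  | nil => simp [List.dropWhile] at h
  | cons a r ih =>
    by_cases ha : p a
    · exact ih (by simpa [List.dropWhile, ha] using h)
    · have : a = c := by simpa [List.dropWhile, ha] using h
      subst this
      simpa using ha

-- positions below the takeWhile length satisfy the predicate
theorem takeWhile_pos_true (p : Char → Bool) (l : List Char) (j : Nat) (c : Char)
    (hj : j < (l.takeWhile p).length) (h : l[j]? = some c) : p c = true := by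
  have hpre : (l.takeWhile p)[j]? = l[j]? := by
    rcases List.takeWhile_prefix (l := l) (p := p) with ⟨t, ht⟩
    conv_rhs => rw [← ht]
    rw [List.getElem?_append_left hj]
  have : (l.takeWhile p)[j]? = some c := hpre.trans h
  exact List.mem_takeWhile_imp (List.mem_of_getElem? this)

-- the combinatorial core: with cs = a ++ '0' :: t, '0' ∉ a, and r the last zero position,
-- the window [f, r] is all zeros iff no zero occurs after the initial zero-run of t
theorem window_iff (a t : List Char) (f r : Nat) (ha : '0' ∉ a)
    (hf0 : (a ++ '0' :: t)[f]? = some '0')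
    (hfmin : ∀ i < f, (a ++ '0' :: t)[i]? ≠ some '0')
    (hr0 : (a ++ '0' :: t)[r]? = some '0')
    (hrmax : ∀ k, r < k → (a ++ '0' :: t)[k]? ≠ some '0') :
    ((∀ n, f ≤ n → n ≤ r → (a ++ '0' :: t)[n]? = some '0') ↔
      '0' ∉ t.dropWhile (· == '0')) := by
  set cs := a ++ '0' :: t with hcs
  obtain ⟨k, hk⟩ : ∃ k, k = (t.takeWhile (· == '0')).length := ⟨_, rfl⟩
  -- f = a.length
  have hlen : (a ++ '0' :: t)[a.length]? = some '0' := by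
    rw [List.getElem?_append_right (le_refl _)]
    simp
  have hfa : f = a.length := by
    rcases Nat.lt_trichotomy f a.length with h | h | h
    · exfalso
      have : cs[f]? = a[f]? := List.getElem?_append_left h
      rw [this] at hf0
      exact ha (List.mem_of_getElem? hf0)
    · exact h
    · exact absurd hlen (hfmin a.length h)
  -- t indexing
  have hT : ∀ j : Nat, t[j]? = cs[f + 1 + j]? := by
    intro j
    rw [hcs, hfa, List.getElem?_append_right (by omega)]
    have h1 : a.length + 1 + j - a.length = j + 1 := by omega
    rw [h1]
    simp
  have hU : ∀ j : Nat, (t.dropWhile (· == '0'))[j]? = t[k + j]? := by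
    intro j
    conv_rhs => rw [← List.takeWhile_append_dropWhile (p := (· == '0')) (l := t)]
    rw [List.getElem?_append_right (by omega : (t.takeWhile (· == '0')).length ≤ k + j)]
    congr 1
    omega
  have hfr : f ≤ r := by
    by_contra h
    exact hfmin r (by omega) hr0
  constructor
  · -- window all zeros → no zero after the run
    intro hw hmem
    rcases List.mem_iff_getElem?.mp hmem with ⟨j, hj⟩
    have h1 : t[k + j]? = some '0' := (hU j).symm.trans hj
    have hZ : cs[f + 1 + (k + j)]? = some '0' := (hT (k + j)).symm.trans h1
    have hle : f + 1 + (k + j) ≤ r := by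
      by_contra h
      exact hrmax _ (by omega) hZ
    have hwk : cs[f + 1 + k]? = some '0' := hw _ (by omega) (by omega)
    have : (t.dropWhile (· == '0'))[0]? = some '0' := by
      rw [hU 0, hT]
      simpa using hwk
    have := dropWhile_head_false (· == '0') t '0' this
    simp at this
  · -- no zero after the run → window all zeros
    intro hu n hfn hnr
    have hrk : r ≤ f + k := by
      by_contra h
      push_neg at h
      have hj : t[r - f - 1]? = some '0' := by rw [hT]; convert hr0 using 2; omega
      have : (t.dropWhile (· == '0'))[r - f - 1 - k]? = some '0' := by
        rw [hU]; convert hj using 2; omega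
      exact hu (List.mem_of_getElem? this)
    rcases Nat.eq_or_lt_of_le hfn with h | h
    · rw [← h]; exact hf0
    · -- f < n ≤ r ≤ f + k: inside the zero run of t
      have hj : n - f - 1 < k := by omega
      have hlt : n - f - 1 < t.length :=
        lt_of_lt_of_le hj (by rw [hk]; exact (List.takeWhile_prefix (p := (· == '0'))).length_le)
      rcases List.getElem?_eq_some_iff.mpr ⟨hlt, rfl⟩ with hsome
      have hc : (t[n - f - 1]'hlt) == '0' :=
        takeWhile_pos_true (· == '0') t (n - f - 1) _ (hk ▸ hj) hsome
      have : t[n - f - 1]? = some '0' := by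
        rw [hsome]
        simpa using hc
      rw [hT] at this
      convert this using 2
      omega

-- ===== VERDICT (by name: the statement is the Claim_ definition above) =====
theorem checkTogether_spec : Claim_equal_checkTogether := by
  intro str _
  unfold Spec_checkTogether checkTogether checkTogether_alt
  set cs := str.toList with hcs
  by_cases h0 : '0' ∈ cs
  · -- there is a zero
    have hin : PySem.Str.isIn "0" str = true := by
      rw [PySem.Str.isIn_eq]
      exact (PySem.Chars.isIn_iff_infix _ _).mpr ((singleton_infix_iff _ _).mpr h0)
    rw [hin]
    simp only [Bool.true_eq_false, if_false]
    -- decompose cs = a ++ '0' :: t with '0' ∉ a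
    obtain ⟨a, d, hta, htd⟩ :
        ∃ a d, a = cs.takeWhile (· != '0') ∧ d = cs.dropWhile (· != '0') := ⟨_, _, rfl, rfl⟩
    have hdne : d ≠ [] := by
      rw [htd, Ne, List.dropWhile_eq_nil_iff]
      intro h
      simpa using h '0' h0
    obtain ⟨c, t, hct⟩ := List.exists_cons_of_ne_nil hdne
    have hc0 : c = '0' := by
      have : (c != '0') = false := by
        apply dropWhile_head_false (· != '0') cs
        rw [← htd, hct]; rfl
      simpa using this
    subst hc0
    have hsplit : cs = a ++ '0' :: t := by
      rw [hta, ← hct, htd, List.takeWhile_append_dropWhile]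
    have ha : '0' ∉ a := by
      intro h
      have := List.mem_takeWhile_imp (hta ▸ h)
      simp at this
    -- find: first zero position
    have hinf : ['0'] <:+: cs := (singleton_infix_iff _ _).mpr h0
    have h0s : ("0" : String).toList = ['0'] := rfl
    have hnn : 0 ≤ PySem.Chars.find cs ['0'] := (PySem.Chars.find_nonneg_iff _ _).mpr hinf
    obtain ⟨f, hfInt⟩ : ∃ f : Nat, PySem.Chars.find cs ['0'] = (f : Int) :=
      ⟨_, (Int.toNat_of_nonneg hnn).symm⟩
    obtain ⟨hfp, hfm⟩ := PySem.Chars.find_spec hnn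
    have hf0 : cs[f]? = some '0' := by
      rw [← prefix_drop_iff]
      simpa [hfInt] using hfp
    have hfmin : ∀ i < f, cs[i]? ≠ some '0' := by
      intro i hi hz
      exact hfm i (by simpa [hfInt] using hi) ((prefix_drop_iff cs i).mpr hz)
    -- rfind: last zero position
    obtain ⟨r, hrInt, _, hr0, hrm⟩ :
        ∃ r : Nat, PySem.Chars.rfind cs ['0'] = (r : Int) ∧ r ≤ cs.length ∧
          cs[r]? = some '0' ∧ ∀ k ≤ cs.length, r < k → cs[k]? ≠ some '0' := by
      rcases rgo_spec cs cs.length with ⟨_, hall⟩ | ⟨m, he, hm, hz, hmax⟩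
      · exfalso
        obtain ⟨i, hi⟩ := List.mem_iff_getElem?.mp h0
        have : i < cs.length := by
          by_contra h
          rw [List.getElem?_eq_none (by omega)] at hi
          exact (Option.some_ne_none '0' hi.symm)
        exact hall i (by omega) hi
      · exact ⟨m, by rw [PySem.Chars.rfind]; exact he, hm, hz, hmax⟩
    have hrmax : ∀ k, r < k → cs[k]? ≠ some '0' := by
      intro k hk
      rcases Nat.lt_or_ge cs.length k with h | h
      · rw [List.getElem?_eq_none (by omega)]
        exact fun h => Option.some_ne_none '0' h.symm
      · exact hrm k h hk
    -- both sides as if-then-else on equivalent conditions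
    rw [PySem.Str.find_eq, PySem.Str.rfind_eq, h0s, ← hcs, hfInt, hrInt, scan_eq]
    rw [dfa0, if_pos h0, dfa1, dfa2, ← htd, hct, List.tail_cons]
    have hwin := window_iff a t f r ha (hsplit ▸ hf0) (by rw [← hsplit]; exact hfmin)
      (hsplit ▸ hr0) (by rw [← hsplit]; exact hrmax)
    rw [← hsplit] at hwin
    have hiff : (∀ i ∈ PySem.List.pyRange (f : Int) ((r : Int) + 1) 1,
        PySem.List.pyGet? cs i = some '0') ↔ '0' ∉ t.dropWhile (· == '0') := by
      rw [← hwin]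
      constructor
      · intro h n hfn hnr
        have hmem : (n : Int) ∈ PySem.List.pyRange (f : Int) ((r : Int) + 1) 1 := by
          rw [PySem.List.mem_pyRange_iff_of_pos (by omega)]
          refine ⟨by exact_mod_cast hfn, by exact_mod_cast (by omega : (n:Int) < (r:Int)+1), one_dvd _⟩
        have := h _ hmem
        rwa [PySem.List.pyGet?_natCast] at this
      · intro h i hi
        rw [PySem.List.mem_pyRange_iff_of_pos (by omega)] at hi
        obtain ⟨h1, h2, _⟩ := hi
        obtain ⟨n, rfl⟩ : ∃ n : Nat, i = (n : Int) :=
          ⟨i.toNat, (Int.toNat_of_nonneg (le_trans (by positivity) h1)).symm⟩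
        rw [PySem.List.pyGet?_natCast]
        exact h n (by exact_mod_cast h1) (by exact_mod_cast (by omega : (n:Int) ≤ (r:Int)))
    by_cases hw : ∀ i ∈ PySem.List.pyRange (f : Int) ((r : Int) + 1) 1,
        PySem.List.pyGet? cs i = some '0'
    · rw [if_pos hw, if_neg (hiff.mp hw)]
    · rw [if_neg hw, if_pos (by by_contra h; exact hw (hiff.mpr h))]
  · -- no zero anywhere
    have hout : PySem.Str.isIn "0" str = false := by
      rw [PySem.Str.isIn_eq]
      exact (PySem.Chars.isIn_eq_false_iff _ _).mpr (fun h => h0 ((singleton_infix_iff _ _).mp h))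
    rw [hout]
    rw [dfa0, if_neg h0]
    simp
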